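-- pv_equiv track=rewrite | github.com/idopinto/Nanogram | nonogram.py | intersection_row
-- ===== SOURCE A (Python) =====
-- BLACK = 1
--
-- X = 0
--
-- UNKNOWN = -1
--
-- def intersection_row(rows):
--     row_option = []
--     rows_organized = [list(x) for x in zip(*rows)]
--     for row in rows_organized:
--         if row.count(X) == len(row):
--             row_option.append(X)
--         elif row.count(BLACK) == len(row):
--             row_option.append(BLACK)
--         else:
--             row_option.append(UNKNOWN)
--
--     return row_option
-- ===== SOURCE B (Python) =====
-- def intersection_row(rows):
--     if not rows:
--         return []
--     acc = list(rows[0])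
--     for row in rows[1:]:
--         acc = [a if a == b else -1 for a, b in zip(acc, row)]
--     return [v if v == 0 or v == 1 else -1 for v in acc]
-- ===== Notes on version B (the rewrite author's own statement) =====
-- stated objective: alternative
-- what changed: Replaces the transpose (zip(*rows)) plus per-column count scans with a single row-major streaming fold that combines rows pairwise (equal values kept, mismatches become UNKNOWN) followed by one final pass mapping non-X/BLACK values to UNKNOWN.
import Mathlib
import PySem

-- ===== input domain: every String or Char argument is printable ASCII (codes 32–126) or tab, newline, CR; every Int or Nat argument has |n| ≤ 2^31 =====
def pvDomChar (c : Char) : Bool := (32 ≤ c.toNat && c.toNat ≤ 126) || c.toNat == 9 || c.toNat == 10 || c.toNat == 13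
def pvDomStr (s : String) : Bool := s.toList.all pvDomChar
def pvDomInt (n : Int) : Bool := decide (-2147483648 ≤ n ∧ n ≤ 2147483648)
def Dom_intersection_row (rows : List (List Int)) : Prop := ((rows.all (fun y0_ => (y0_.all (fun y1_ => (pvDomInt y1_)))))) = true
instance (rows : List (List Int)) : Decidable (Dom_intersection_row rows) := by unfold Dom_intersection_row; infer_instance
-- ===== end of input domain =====

-- B replaces the transpose-then-count-per-column scan with a row-major streaming
-- fold (pairwise combine with UNKNOWN absorbing) plus one final mapping pass.

-- ===== PORT A =====
-- zip(*rows): columns in order, truncated to the shortest row; exact for Python's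
-- zip star-unpacking (the getD default 0 is unreachable since i < every row length).
def pyZipStar (rows : List (List Int)) : List (List Int) :=
  match rows with
  | [] => []
  | r :: rest =>
      let n := rest.foldl (fun m row => min m row.length) r.length
      (List.range n).map (fun i => (r :: rest).map (fun row => row.getD i 0))

def intersection_row (rows : List (List Int)) : List Int :=
  let rows_organized := pyZipStar rows
  rows_organized.foldl (fun row_option row =>
    if PySem.List.count row (0 : Int) = row.length then row_option ++ [(0 : Int)]
    else if PySem.List.count row (1 : Int) = row.length then row_option ++ [(1 : Int)]
    else row_option ++ [(-1 : Int)]) []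

-- ===== PORT B =====
def intersection_row_alt (rows : List (List Int)) : List Int :=
  match rows with
  | [] => []
  | r :: rest =>
      let acc := rest.foldl
        (fun acc row => (acc.zip row).map (fun p => if p.1 = p.2 then p.1 else (-1 : Int))) r
      acc.map (fun v => if v = 0 ∨ v = 1 then v else (-1 : Int))

-- ===== PRECONDITION & SPEC =====
def Spec_intersection_row (rows : List (List Int)) (out : List Int) : Prop := out = intersection_row_alt rows
instance (rows : List (List Int)) (out : List Int) : Decidable (Spec_intersection_row rows out) := by unfold Spec_intersection_row; infer_instance

-- ===== CLAIM (what is proved, stated in full; the proofs are below) =====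
def Claim_equal_intersection_row : Prop := ∀ (rows : List (List Int)), Dom_intersection_row rows → Spec_intersection_row rows (intersection_row rows)

-- ===== LEMMAS AND PROOFS =====

-- proof-side abbreviations
def pvGd (l : List Int) (i : Nat) : Int := l.getD i 0

def pvStep (acc row : List Int) : List Int :=
  (acc.zip row).map (fun p => if p.1 = p.2 then p.1 else (-1 : Int))

def pvClassify (col : List Int) : Int :=
  if PySem.List.count col (0 : Int) = col.length then 0
  else if PySem.List.count col (1 : Int) = col.length then 1
  else -1

theorem pvGd_eq (l : List Int) (i : Nat) (h : i < l.length) : pvGd l i = l[i] :=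
  List.getD_eq_getElem _ _ h

theorem foldl_append_classify (l : List (List Int)) (init : List Int) :
    l.foldl (fun row_option row =>
      if PySem.List.count row (0 : Int) = row.length then row_option ++ [(0 : Int)]
      else if PySem.List.count row (1 : Int) = row.length then row_option ++ [(1 : Int)]
      else row_option ++ [(-1 : Int)]) init = init ++ l.map pvClassify := by
  induction l generalizing init with
  | nil => simp
  | cons col l ih =>
      simp only [List.foldl_cons, List.map_cons, ih, pvClassify]
      split_ifs <;> simp

theorem intersection_row_eq_map (rows : List (List Int)) :
    intersection_row rows = (pyZipStar rows).map pvClassify := by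
  simpa using foldl_append_classify (pyZipStar rows) []

theorem length_pvStep (acc row : List Int) :
    (pvStep acc row).length = min acc.length row.length := by
  simp [pvStep]

theorem length_foldl_pvStep (rest : List (List Int)) (acc : List Int) :
    (rest.foldl pvStep acc).length
      = rest.foldl (fun m row => min m row.length) acc.length := by
  induction rest generalizing acc with
  | nil => rfl
  | cons row rest ih => simp [List.foldl_cons, ih, length_pvStep]

theorem foldlMin_le_init (rest : List (List Int)) (a : Nat) :
    rest.foldl (fun m row => min m row.length) a ≤ a := by
  induction rest generalizing a with
  | nil => simp
  | cons row rest ih =>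
      simp only [List.foldl_cons]
      exact le_trans (ih _) (Nat.min_le_left _ _)

theorem getElem_pvStep (acc row : List Int) (i : Nat)
    (h : i < (pvStep acc row).length) :
    (pvStep acc row)[i] =
      if pvGd acc i = pvGd row i then pvGd acc i else -1 := by
  have h' := h
  rw [length_pvStep] at h'
  rw [pvGd_eq acc i (lt_of_lt_of_le h' (Nat.min_le_left _ _)),
    pvGd_eq row i (lt_of_lt_of_le h' (Nat.min_le_right _ _))]
  simp [pvStep, List.getElem_map, List.getElem_zip]

theorem getElem_foldl_pvStep (rest : List (List Int)) (acc : List Int) (i : Nat)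
    (h : i < (rest.foldl pvStep acc).length) :
    (rest.foldl pvStep acc)[i] =
      if ∀ row ∈ rest, pvGd row i = pvGd acc i then pvGd acc i else -1 := by
  induction rest generalizing acc with
  | nil =>
      simp only [List.foldl_nil] at h ⊢
      simp [pvGd_eq acc i h]
  | cons row rest ih =>
      simp only [List.foldl_cons] at h ⊢
      have hi : i < (pvStep acc row).length := by
        have hh := h
        rw [length_foldl_pvStep] at hh
        exact lt_of_lt_of_le hh (foldlMin_le_init rest (pvStep acc row).length)
      have hstep : pvGd (pvStep acc row) i =
          if pvGd acc i = pvGd row i then pvGd acc i else -1 := by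
        rw [pvGd_eq _ _ hi, getElem_pvStep _ _ _ hi]
      rw [ih _ h, hstep]
      by_cases hr : pvGd acc i = pvGd row i
      · rw [if_pos hr]
        by_cases hrest : ∀ r' ∈ rest, pvGd r' i = pvGd acc i
        · have hcons : ∀ r' ∈ row :: rest, pvGd r' i = pvGd acc i := by
            intro r' hr'
            rcases List.mem_cons.mp hr' with rfl | h'
            · exact hr.symm
            · exact hrest _ h'
          rw [if_pos hrest, if_pos hcons]
        · rw [if_neg hrest,
            if_neg (fun hc => hrest (fun r' h' => hc r' (List.mem_cons_of_mem _ h')))]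
      · rw [if_neg hr]
        have hL : (if ∀ r' ∈ rest, pvGd r' i = (-1 : Int) then (-1 : Int) else -1) = -1 := by
          split <;> rfl
        rw [hL, if_neg (fun hc => hr ((hc row List.mem_cons_self).symm : pvGd acc i = pvGd row i))]

theorem count_eq_length_iff (l : List Int) (v : Int) :
    PySem.List.count l v = l.length ↔ ∀ x ∈ l, x = v := by
  rw [PySem.List.count_eq]
  constructor
  · intro h x hx
    exact (List.count_eq_length.mp h x hx).symm
  · intro h
    exact List.count_eq_length.mpr (fun b hb => (h b hb).symm)

-- ===== VERDICT (by name: the statement is the Claim_ definition above) =====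
theorem intersection_row_spec : Claim_equal_intersection_row := by
  intro rows _
  unfold Spec_intersection_row
  cases rows with
  | nil => rfl
  | cons r rest =>
      rw [intersection_row_eq_map]
      show ((pyZipStar (r :: rest)).map pvClassify)
          = (rest.foldl pvStep r).map (fun v => if v = 0 ∨ v = 1 then v else (-1 : Int))
      set n := rest.foldl (fun m row => min m row.length) r.length with hn
      have hlenA : ((pyZipStar (r :: rest)).map pvClassify).length = n := by
        rw [hn]; simp [pyZipStar]
      have hlenacc : (rest.foldl pvStep r).length = n :=
        (length_foldl_pvStep rest r).trans hn.symm
      apply List.ext_getElem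
      · simp [hlenA, hlenacc]
      · intro i h1 h2
        have hiacc : i < (rest.foldl pvStep r).length := by
          rw [hlenacc]; rwa [hlenA] at h1
        have hA : ((pyZipStar (r :: rest)).map pvClassify)[i]
            = pvClassify ((r :: rest).map (fun row => pvGd row i)) := by
          simp [pyZipStar, pvGd, List.getElem_map]
        have hB : ((rest.foldl pvStep r).map (fun v => if v = 0 ∨ v = 1 then v else (-1 : Int)))[i]
            = (fun v => if v = 0 ∨ v = 1 then v else (-1 : Int)) ((rest.foldl pvStep r)[i]) := by
          simp [List.getElem_map]
        rw [hA, hB, getElem_foldl_pvStep _ _ _ hiacc]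
        simp only [pvClassify, List.map_cons]
        by_cases hall : ∀ row ∈ rest, pvGd row i = pvGd r i
        · rw [if_pos hall]
          by_cases h0 : pvGd r i = 0
          · have hv : ∀ x ∈ (pvGd r i :: rest.map (fun row => pvGd row i)), x = (0 : Int) := by
              intro x hx
              rcases List.mem_cons.mp hx with rfl | hx
              · exact h0
              · rcases List.mem_map.mp hx with ⟨row, hrow, rfl⟩
                rw [hall row hrow, h0]
            rw [if_pos ((count_eq_length_iff _ _).mpr hv)]
            simp [h0]
          · by_cases h1' : pvGd r i = 1
            · have hnot0 : ¬ PySem.List.count (pvGd r i :: rest.map (fun row => pvGd row i)) (0:Int) = (pvGd r i :: rest.map (fun row => pvGd row i)).length := by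
                intro hc
                exact h0 ((count_eq_length_iff _ _).mp hc _ List.mem_cons_self)
              have hv : ∀ x ∈ (pvGd r i :: rest.map (fun row => pvGd row i)), x = (1 : Int) := by
                intro x hx
                rcases List.mem_cons.mp hx with rfl | hx
                · exact h1'
                · rcases List.mem_map.mp hx with ⟨row, hrow, rfl⟩
                  rw [hall row hrow, h1']
              rw [if_neg hnot0, if_pos ((count_eq_length_iff _ _).mpr hv)]
              simp [h1']
            · have hnot0 : ¬ PySem.List.count (pvGd r i :: rest.map (fun row => pvGd row i)) (0:Int) = (pvGd r i :: rest.map (fun row => pvGd row i)).length := by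
                intro hc
                exact h0 ((count_eq_length_iff _ _).mp hc _ List.mem_cons_self)
              have hnot1 : ¬ PySem.List.count (pvGd r i :: rest.map (fun row => pvGd row i)) (1:Int) = (pvGd r i :: rest.map (fun row => pvGd row i)).length := by
                intro hc
                exact h1' ((count_eq_length_iff _ _).mp hc _ List.mem_cons_self)
              rw [if_neg hnot0, if_neg hnot1]
              simp [h0, h1']
        · rw [if_neg hall]
          push Not at hall
          obtain ⟨row, hmem, hne⟩ := hall
          have hnot0 : ¬ PySem.List.count (pvGd r i :: rest.map (fun row => pvGd row i)) (0:Int) = (pvGd r i :: rest.map (fun row => pvGd row i)).length := by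
            intro hc
            have hc' := (count_eq_length_iff _ _).mp hc
            exact hne (by rw [hc' _ (List.mem_cons_of_mem _ (List.mem_map.mpr ⟨row, hmem, rfl⟩)), hc' _ List.mem_cons_self])
          have hnot1 : ¬ PySem.List.count (pvGd r i :: rest.map (fun row => pvGd row i)) (1:Int) = (pvGd r i :: rest.map (fun row => pvGd row i)).length := by
            intro hc
            have hc' := (count_eq_length_iff _ _).mp hc
            exact hne (by rw [hc' _ (List.mem_cons_of_mem _ (List.mem_map.mpr ⟨row, hmem, rfl⟩)), hc' _ List.mem_cons_self])
          rw [if_neg hnot0, if_neg hnot1]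
          norm_num
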